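-- pv_equiv track=rewrite | github.com/jcolinpatrick/kryptos | scripts/blitz/blitz_model2_novel.py | strip_perm_keyword
-- ===== SOURCE A (Python) =====
-- import json, os, sys, time, math
--
-- def strip_perm_keyword(ct_str, L, kw):
--     """
--     Block/strip permutation: divide ct_str into strips of length L (last may be shorter),
--     then reorder strips according to keyword-derived order.
--     """
--     n = len(ct_str)
--     n_strips = math.ceil(n / L)
--     strips = [ct_str[i*L:(i+1)*L] for i in range(n_strips)]
--     if len(strips) < len(kw):
--         strip_order = sorted(range(len(strips)), key=lambda i: (kw[i % len(kw)], i))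
--     else:
--         strip_order = sorted(range(len(strips)), key=lambda i: (kw[i % len(kw)], i))
--     return ''.join(strips[i] for i in strip_order)
-- ===== SOURCE B (Python) =====
-- import math
--
-- def strip_perm_keyword(ct_str, L, kw):
--     """
--     Same strip permutation without building a strips list or sorting composite keys:
--     for each distinct keyword character in increasing order, emit the slices whose
--     index maps to that character (increasing index = the stable tie-break).
--     """
--     n_strips = math.ceil(len(ct_str) / L)
--     key = lambda i: kw[i % len(kw)]
--     chars = sorted({key(i) for i in range(n_strips)})
--     return ''.join(ct_str[i*L:(i+1)*L]
--                    for c in chars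
--                    for i in range(n_strips)
--                    if key(i) == c)
-- ===== Notes on version B (the rewrite author's own statement) =====
-- stated objective: alternative
-- what changed: Drops the strips list and the sorted() on a composite (char, index) key: B collects the distinct keyword characters, and for each one in increasing order emits the matching slices of ct_str directly, the increasing index scan reproducing the stable tie-break.
import Mathlib
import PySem

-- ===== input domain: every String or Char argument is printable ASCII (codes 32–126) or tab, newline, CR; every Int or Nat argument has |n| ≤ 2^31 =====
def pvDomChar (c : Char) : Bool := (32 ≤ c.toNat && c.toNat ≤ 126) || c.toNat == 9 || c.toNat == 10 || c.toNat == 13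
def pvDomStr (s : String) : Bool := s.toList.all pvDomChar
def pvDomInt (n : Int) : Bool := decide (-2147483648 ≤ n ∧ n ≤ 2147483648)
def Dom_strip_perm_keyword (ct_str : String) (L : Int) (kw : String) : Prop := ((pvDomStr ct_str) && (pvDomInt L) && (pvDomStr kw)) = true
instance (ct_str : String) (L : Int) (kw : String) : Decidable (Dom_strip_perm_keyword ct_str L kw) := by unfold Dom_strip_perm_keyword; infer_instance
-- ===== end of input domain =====

-- B drops A's strips list and its sorted() on a composite (char, index) key: it emits the slices
-- for each distinct keyword character in increasing character order directly (alternative algorithm, same results).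


-- ===== PORT A =====
-- math.ceil(n / L) as exact integer ceiling division; exact for 0 ≤ n ≤ 2^31, |L| ≤ 2^31
-- (the float quotient's rounding error is below the distance to the next integer); L = 0 excluded by Pre_.
def pvCeilDiv (n L : Int) : Int := -(PySem.Int.floordiv (-n) L)

def strip_perm_keyword (ct_str : String) (L : Int) (kw : String) : String :=
  let cs := ct_str.toList
  let n : Int := (cs.length : Int)
  let n_strips : Int := pvCeilDiv n L
  let strips : List (List Char) :=
    (PySem.List.pyRange 0 n_strips).map
      (fun i => PySem.List.slice cs (some (i * L)) (some ((i + 1) * L)))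
  -- key=lambda i: (kw[i % len(kw)], i); kw[i % len(kw)] raises iff kw = "" (excluded by Pre_ when strips ≠ [])
  let strip_order : List Int :=
    if (strips.length : Int) < (kw.toList.length : Int) then
      PySem.List.sorted2 (PySem.List.pyRange 0 (strips.length : Int))
        (fun i => (PySem.List.pyGet? kw.toList (PySem.Int.mod i (kw.toList.length : Int))).getD ' ')
        (fun i => i) false
    else
      PySem.List.sorted2 (PySem.List.pyRange 0 (strips.length : Int))
        (fun i => (PySem.List.pyGet? kw.toList (PySem.Int.mod i (kw.toList.length : Int))).getD ' ')
        (fun i => i) false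
  String.ofList ((strip_order.map (fun i => (PySem.List.pyGet? strips i).getD [])).flatten)

-- ===== PORT B =====
def strip_perm_keyword_alt (ct_str : String) (L : Int) (kw : String) : String :=
  let n_strips : Int := pvCeilDiv (ct_str.toList.length : Int) L
  -- key = lambda i: kw[i % len(kw)]
  let key : Int → Char := fun i =>
    (PySem.List.pyGet? kw.toList (PySem.Int.mod i (kw.toList.length : Int))).getD ' '
  -- chars = sorted({key(i) for i in range(n_strips)})
  let chars : List Char :=
    PySem.List.sorted (PySem.Set.ofList ((PySem.List.pyRange 0 n_strips).map key)) (fun c => c) false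
  -- ''.join(ct_str[i*L:(i+1)*L] for c in chars for i in range(n_strips) if key(i) == c)
  String.ofList
    ((chars.flatMap (fun c =>
        ((PySem.List.pyRange 0 n_strips).filter (fun i => key i == c)).map
          (fun i => PySem.List.slice ct_str.toList (some (i * L)) (some ((i + 1) * L))))).flatten)

-- ===== PRECONDITION & SPEC =====
-- Pre_ excludes exactly the inputs where the Python A raises ZeroDivisionError:
-- L = 0 (in n / L), and kw = "" while at least one strip exists (in i % len(kw)).
def Pre_strip_perm_keyword (ct_str : String) (L : Int) (kw : String) : Prop :=
  L ≠ 0 ∧ (kw ≠ "" ∨ L < 0 ∨ ct_str = "")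
instance (ct_str : String) (L : Int) (kw : String) : Decidable (Pre_strip_perm_keyword ct_str L kw) := by
  unfold Pre_strip_perm_keyword; infer_instance

def pvWitness_strip_perm_keyword : String × Int × String := ("abcdefgh", 3, "ba")

def Spec_strip_perm_keyword (ct_str : String) (L : Int) (kw : String) (out : String) : Prop :=
  out = strip_perm_keyword_alt ct_str L kw
instance (ct_str : String) (L : Int) (kw : String) (out : String) : Decidable (Spec_strip_perm_keyword ct_str L kw out) := by
  unfold Spec_strip_perm_keyword; infer_instance

-- ===== CLAIM (what is proved, stated in full; the proofs are below) =====
def Claim_equal_strip_perm_keyword : Prop := ∀ (ct_str : String) (L : Int) (kw : String), Dom_strip_perm_keyword ct_str L kw → Pre_strip_perm_keyword ct_str L kw → Spec_strip_perm_keyword ct_str L kw (strip_perm_keyword ct_str L kw)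

-- ===== LEMMAS AND PROOFS =====

-- insertBy compares the inserted element with members of the list: congruent comparators agree.
lemma pv_insertBy_congr {α : Type} (p : α → Prop) (f g : α → α → Bool)
    (h : ∀ a b, p a → p b → f a b = g a b) :
    ∀ (l : List α) (x : α), p x → (∀ y ∈ l, p y) →
      PySem.List.insertBy f x l = PySem.List.insertBy g x l := by
  intro l
  induction l with
  | nil => intro x _ _; rfl
  | cons y ys ih =>
    intro x hx hl
    simp only [PySem.List.insertBy]
    rw [h x y hx (hl y (by simp))]
    split
    · rfl
    · rw [ih x hx (fun z hz => hl z (by simp [hz]))]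

lemma pv_foldl_insertBy_congr {α : Type} (p : α → Prop) (f g : α → α → Bool)
    (h : ∀ a b, p a → p b → f a b = g a b) :
    ∀ (l acc : List α), (∀ y ∈ l, p y) → (∀ y ∈ acc, p y) →
      l.foldl (fun acc x => PySem.List.insertBy f x acc) acc
        = l.foldl (fun acc x => PySem.List.insertBy g x acc) acc := by
  intro l
  induction l with
  | nil => intro acc _ _; rfl
  | cons x xs ih =>
    intro acc hl hacc
    simp only [List.foldl_cons]
    rw [pv_insertBy_congr p f g h acc x (hl x (by simp)) hacc]
    exact ih _ (fun y hy => hl y (by simp [hy]))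
      (fun y hy => by
        rcases (PySem.List.mem_insertBy g x y acc).mp hy with rfl | hy'
        · exact hl y (by simp)
        · exact hacc y hy')

-- concatenating, over a duplicate-free cover of the key values, the filters by each key value
-- is a permutation of the original list
lemma pv_flatMap_filter_perm {α : Type} (key : α → Char) :
    ∀ (cs : List Char) (xs : List α), cs.Nodup → (∀ x ∈ xs, key x ∈ cs) →
      (cs.flatMap (fun c => xs.filter (fun x => key x == c))).Perm xs := by
  intro cs
  induction cs with
  | nil =>
    intro xs _ hcov
    have : xs = [] := List.eq_nil_iff_forall_not_mem.mpr (fun x hx => by simpa using hcov x hx)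
    simp [this]
  | cons c cs ih =>
    intro xs hnd hcov
    have hc : c ∉ cs := (List.nodup_cons.mp hnd).1
    have hnd' : cs.Nodup := (List.nodup_cons.mp hnd).2
    have hrest : cs.flatMap (fun c' => xs.filter (fun x => key x == c'))
        = cs.flatMap (fun c' => (xs.filter (fun x => !(key x == c))).filter (fun x => key x == c')) := by
      apply List.flatMap_congr
      intro c' hc'
      rw [List.filter_filter]
      apply List.filter_congr
      intro x _
      have hne : c' ≠ c := fun e => hc (e ▸ hc')
      by_cases h : key x = c'
      · simp [h, hne]
      · simp [h]
    have hcov' : ∀ x ∈ xs.filter (fun x => !(key x == c)), key x ∈ cs := by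
      intro x hx
      rcases List.mem_filter.mp hx with ⟨hx1, hx2⟩
      have := hcov x hx1
      simp only [List.mem_cons] at this
      rcases this with h | h
      · simp [h] at hx2
      · exact h
    have h1 : ((c :: cs).flatMap (fun c' => xs.filter (fun x => key x == c')))
        = xs.filter (fun x => key x == c)
            ++ cs.flatMap (fun c' => (xs.filter (fun x => !(key x == c))).filter (fun x => key x == c')) := by
      rw [List.flatMap_cons, hrest]
    rw [h1]
    exact ((ih _ hnd' hcov').append_left _).trans (List.filter_append_perm _ xs)

-- bucket concatenation in increasing character order is strictly increasing under the
-- (character, index) encoding enc i = (key i).toNat * N + i.toNat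
lemma pv_flatMap_pairwise (key : Int → Char) (N : Nat) (idxs : List Int)
    (hidx : ∀ i ∈ idxs, 0 ≤ i ∧ i < (N : Int)) (hpw : idxs.Pairwise (· < ·)) :
    ∀ cs : List Char, cs.Pairwise (· < ·) →
      (cs.flatMap (fun c => idxs.filter (fun i => key i == c))).Pairwise
        (fun a b => (key a).toNat * N + a.toNat < (key b).toNat * N + b.toNat) := by
  intro cs
  induction cs with
  | nil => intro _; simp
  | cons c cs ih =>
    intro hcs
    rcases List.pairwise_cons.mp hcs with ⟨hhead, htail⟩
    rw [List.flatMap_cons, List.pairwise_append]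
    refine ⟨?_, ih htail, ?_⟩
    · -- within one bucket: same character, increasing indices
      refine List.Pairwise.imp_of_mem ?_ (List.Pairwise.sublist List.filter_sublist hpw)
      intro a b ha hb hab
      have hka : key a = c := by simpa using (List.mem_filter.mp ha).2
      have hkb : key b = c := by simpa using (List.mem_filter.mp hb).2
      have h0a := (hidx a (List.mem_filter.mp ha).1).1
      rw [hka, hkb]
      omega
    · -- across buckets: strictly larger character
      intro a ha b hb
      have hka : key a = c := by simpa using (List.mem_filter.mp ha).2
      rcases List.mem_flatMap.mp hb with ⟨c', hc', hb'⟩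
      have hkb : key b = c' := by simpa using (List.mem_filter.mp hb').2
      have hcc' : c < c' := hhead c' hc'
      have hk : (key a).toNat < (key b).toNat := by
        rw [hka, hkb]; exact hcc'
      have haN := hidx a (List.mem_filter.mp ha).1
      have hmul : (key a).toNat * N + N ≤ (key b).toNat * N := by
        have := Nat.mul_le_mul_right N (Nat.succ_le_of_lt hk)
        simpa [Nat.succ_mul] using this
      omega

-- the stable composite-key sort IS the bucket concatenation over sorted distinct characters
lemma pv_sorted2_eq_groups (key : Int → Char) (N : Nat) :
    PySem.List.sorted2 ((List.range N).map (fun k : Nat => (k : Int))) key (fun i => i) false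
      = (PySem.List.sorted (PySem.Set.ofList (((List.range N).map (fun k : Nat => (k : Int))).map key))
            (fun c => c) false).flatMap
          (fun c => ((List.range N).map (fun k : Nat => (k : Int))).filter (fun i => key i == c)) := by
  set idxs : List Int := (List.range N).map (fun k : Nat => (k : Int)) with hidxs
  have hmem : ∀ i ∈ idxs, 0 ≤ i ∧ i < (N : Int) := by
    intro i hi
    simp only [hidxs, List.mem_map, List.mem_range] at hi
    obtain ⟨k, hk, rfl⟩ := hi
    omega
  have hpw : idxs.Pairwise (· < ·) := by
    rw [hidxs, List.pairwise_map]
    exact List.pairwise_lt_range.imp (fun h => by exact_mod_cast h)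
  set enc : Int → Nat := fun i => (key i).toNat * N + i.toNat with henc
  set ks : List Char := PySem.List.sorted (PySem.Set.ofList (idxs.map key)) (fun c => c) false with hks
  -- step 1: the composite (char, index) key agrees with enc on idxs
  have h1 : PySem.List.sorted2 idxs key (fun i => i) false = PySem.List.sorted idxs enc false := by
    rw [PySem.List.sorted_eq_foldl_insertBy idxs enc]
    show idxs.foldl (fun acc x => PySem.List.insertBy
        (fun a b => decide (key a < key b) || (!decide (key b < key a) && decide (a < b))) x acc) []
      = idxs.foldl (fun acc x => PySem.List.insertBy (fun a b => decide (enc a < enc b)) x acc) []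
    apply pv_foldl_insertBy_congr (fun i => i ∈ idxs) _ _ ?_ idxs [] (fun y hy => hy) (by simp)
    intro a b ha hb
    have hba := hmem a ha
    have hbb := hmem b hb
    have hchar : ∀ x y : Char, x < y ↔ x.toNat < y.toNat := fun _ _ => Iff.rfl
    rcases lt_trichotomy (key a) (key b) with h | h | h
    · have hk : (key a).toNat < (key b).toNat := (hchar _ _).mp h
      have : enc a < enc b := by
        have hmul : (key a).toNat * N + N ≤ (key b).toNat * N := by
          have := Nat.mul_le_mul_right N (Nat.succ_le_of_lt hk)
          simpa [Nat.succ_mul] using this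
        simp only [henc]; omega
      simp [h, this]
    · have : (enc a < enc b) ↔ a < b := by
        simp only [henc, h]; omega
      simp [h, this]
    · have hk : (key b).toNat < (key a).toNat := (hchar _ _).mp h
      have : ¬ enc a < enc b := by
        have hmul : (key b).toNat * N + N ≤ (key a).toNat * N := by
          have := Nat.mul_le_mul_right N (Nat.succ_le_of_lt hk)
          simpa [Nat.succ_mul] using this
        simp only [henc]; omega
      simp [h, not_lt_of_gt h, this]
  -- step 2: name the enc-sorted order as the bucket concatenation
  rw [h1]
  apply PySem.List.sorted_eq_of_perm_of_pairwise_lt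
  · apply pv_flatMap_filter_perm
    · exact ((PySem.List.sorted_perm _ _ _).symm.nodup (PySem.Set.nodup_ofList _))
    · intro i hi
      rw [hks, PySem.List.mem_sorted]
      exact (PySem.Set.mem_ofList _ _).mpr (List.mem_map_of_mem hi)
  · exact pv_flatMap_pairwise key N idxs hmem hpw ks (PySem.List.sorted_ofList_pairwise_lt _)

-- looking a strip up in A's strips list is slicing it directly (B's shape), for in-range indices
lemma pv_lookup_strip (cs : List Char) (L : Int) (N : Nat) :
    ∀ i ∈ (List.range N).map (fun k : Nat => (k : Int)),
      (PySem.List.pyGet?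
          (((List.range N).map (fun k : Nat => (k : Int))).map
            (fun i => PySem.List.slice cs (some (i * L)) (some ((i + 1) * L)))) i).getD []
        = PySem.List.slice cs (some (i * L)) (some ((i + 1) * L)) := by
  intro i hi
  simp only [List.mem_map, List.mem_range] at hi
  obtain ⟨k, hk, rfl⟩ := hi
  rw [PySem.List.pyGet?_natCast]
  simp [hk]

-- pyRange 0 n is range n.toNat, cast
lemma pv_pyRange_zero (NZ : Int) :
    PySem.List.pyRange 0 NZ = (List.range NZ.toNat).map (fun k : Nat => (k : Int)) := by
  rcases le_or_gt 0 NZ with h | h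
  · rw [show NZ = ((NZ.toNat : Nat) : Int) from (Int.toNat_of_nonneg h).symm,
      PySem.List.pyRange_zero_natCast]
    rw [Int.toNat_natCast]
  · have h1 : PySem.List.pyRange 0 NZ = [] := by simp [PySem.List.pyRange]; omega
    have h2 : NZ.toNat = 0 := by omega
    simp [h1, h2]

-- ===== VERDICT (by name: the statement is the Claim_ definition above) =====
theorem strip_perm_keyword_spec : Claim_equal_strip_perm_keyword := by
  intro ct_str L kw _ _
  show strip_perm_keyword ct_str L kw = strip_perm_keyword_alt ct_str L kw
  unfold strip_perm_keyword strip_perm_keyword_alt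
  dsimp only
  rw [ite_self, pv_pyRange_zero (pvCeilDiv (ct_str.toList.length : Int) L)]
  simp only [List.length_map, List.length_range]
  rw [PySem.List.pyRange_zero_natCast]
  rw [pv_sorted2_eq_groups
    (fun i => (PySem.List.pyGet? kw.toList (PySem.Int.mod i (kw.toList.length : Int))).getD ' ')
    (pvCeilDiv (ct_str.toList.length : Int) L).toNat]
  rw [List.map_flatMap]
  congr 2
  apply List.flatMap_congr
  intro c _
  apply List.map_congr_left
  intro i hi
  exact pv_lookup_strip ct_str.toList L _ i (List.mem_of_mem_filter hi)
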